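-- pv_equiv track=rewrite | github.com/kkbughunter/Design_and_Analysis_of_Algorithms | Assignment_02/Q3_freq.py | most_frequent_chars2
-- ===== SOURCE A (Python) =====
-- def most_frequent_chars2(s):
--     freq = {}
--     max_count = 0
--     res = []
--     for c in s:
--         if c in freq:
--             freq[c] += 1
--         else:
--             freq[c] = 1
--         if freq[c] > max_count:
--             max_count = freq[c]
--             res = [c]
--         elif freq[c] == max_count:
--             res.append(c)
--     return res
-- ===== SOURCE B (Python) =====
-- def most_frequent_chars2(s):
--     # Two-phase: compute the maximum frequency first, then collect, in order,
--     # every character whose running count reaches that maximum.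
--     if not s:
--         return []
--     counts = {}
--     for c in s:
--         counts[c] = counts.get(c, 0) + 1
--     m = max(counts.values())
--     res = []
--     running = {}
--     for c in s:
--         running[c] = running.get(c, 0) + 1
--         if running[c] == m:
--             res.append(c)
--     return res
-- ===== Notes on version B (the rewrite author's own statement) =====
-- stated objective: simpler
-- what changed: Replaces A's one-pass reset-on-new-maximum accumulator (res is rebuilt every time max_count grows) by two plain passes: count all characters, take the maximum frequency, then collect in order every character whose running count reaches that maximum.
import Mathlib
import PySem

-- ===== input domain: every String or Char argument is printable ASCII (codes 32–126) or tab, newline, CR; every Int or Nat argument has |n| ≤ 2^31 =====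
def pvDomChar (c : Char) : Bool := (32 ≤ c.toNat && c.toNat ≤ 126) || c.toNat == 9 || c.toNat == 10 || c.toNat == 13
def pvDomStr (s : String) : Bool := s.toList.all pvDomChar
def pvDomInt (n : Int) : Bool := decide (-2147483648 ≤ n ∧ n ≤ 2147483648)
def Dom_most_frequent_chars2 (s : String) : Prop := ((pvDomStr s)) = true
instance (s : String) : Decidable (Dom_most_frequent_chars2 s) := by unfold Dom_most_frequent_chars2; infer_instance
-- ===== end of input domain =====

-- B replaces A's reset-on-new-maximum bookkeeping by two plain passes (count everything,
-- take the max, then collect chars whose running count reaches it); objective: simpler.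

-- ===== PORT A =====
def most_frequent_chars2 (s : String) : List String :=
  (s.toList.foldl
    (fun (st : PySem.Dict Char Int × Int × List String) (c : Char) =>
      let freq := if st.1.contains c then st.1.insert c (st.1.getD c 0 + 1)
                  else st.1.insert c 1
      let fc := freq.getD c 0
      if fc > st.2.1 then (freq, fc, [c.toString])
      else if fc = st.2.1 then (freq, st.2.1, st.2.2 ++ [c.toString])
      else (freq, st.2.1, st.2.2))
    (PySem.Dict.empty, 0, [])).2.2

-- ===== PORT B =====
def most_frequent_chars2_alt (s : String) : List String :=
  if s.toList = [] then []
  else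
    let counts : PySem.Dict Char Int :=
      s.toList.foldl (fun d c => d.insert c (d.getD c 0 + 1)) PySem.Dict.empty
    -- max(counts.values()): counts is nonempty here, so max? is some and .getD 0 never takes the default
    let m := (PySem.List.max? counts.values (fun x => x)).getD 0
    (s.toList.foldl
      (fun (st : PySem.Dict Char Int × List String) (c : Char) =>
        let running := st.1.insert c (st.1.getD c 0 + 1)
        if running.getD c 0 = m then (running, st.2 ++ [c.toString])
        else (running, st.2))
      (PySem.Dict.empty, [])).2

-- ===== PRECONDITION & SPEC =====
def Spec_most_frequent_chars2 (s : String) (out : List String) : Prop := out = most_frequent_chars2_alt s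
instance (s : String) (out : List String) : Decidable (Spec_most_frequent_chars2 s out) := by unfold Spec_most_frequent_chars2; infer_instance

-- ===== CLAIM (what is proved, stated in full; the proofs are below) =====
def Claim_equal_most_frequent_chars2 : Prop := ∀ (s : String), Dom_most_frequent_chars2 s → Spec_most_frequent_chars2 s (most_frequent_chars2 s)

-- ===== LEMMAS AND PROOFS =====

-- running maximum of A's max_count over the suffix t, given the already-processed prefix p
def pvMstep (M : Int) (p t : List Char) : Int :=
  match t with
  | [] => M
  | c :: t' => pvMstep (max M ((p.count c : Int) + 1)) (p ++ [c]) t'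

-- chars of t (after prefix p) whose running count equals m — the shape of B's second pass
def pvGo (m : Int) (p t : List Char) : List String :=
  match t with
  | [] => []
  | c :: t' => if ((p.count c : Int) + 1) = m then c.toString :: pvGo m (p ++ [c]) t'
               else pvGo m (p ++ [c]) t'

-- A's res accumulator over the suffix t
def pvRes (M : Int) (r : List String) (p t : List Char) : List String :=
  match t with
  | [] => r
  | c :: t' =>
    if ((p.count c : Int) + 1) > M then pvRes ((p.count c : Int) + 1) [c.toString] (p ++ [c]) t'
    else if ((p.count c : Int) + 1) = M then pvRes M (r ++ [c.toString]) (p ++ [c]) t'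
    else pvRes M r (p ++ [c]) t'

lemma pv_count_append (p : List Char) (c y : Char) :
    ((p ++ [c]).count y : Int) = (p.count y : Int) + (if y = c then 1 else 0) := by
  by_cases h : y = c
  · rw [if_pos h, h]; simp [List.count_append]
  · rw [if_neg h]; simp [List.count_append, Ne.symm h]

lemma pv_counter_append (p : List Char) (c : Char) :
    PySem.Dict.counter (p ++ [c])
      = (PySem.Dict.counter p).insert c ((PySem.Dict.counter p).getD c 0 + 1) := by
  rw [← PySem.Dict.foldl_insert_getD_add_one_eq_counter (p ++ [c]), List.foldl_append,
      PySem.Dict.foldl_insert_getD_add_one_eq_counter p]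
  rfl

lemma pv_le_Mstep (M : Int) (p t : List Char) : M ≤ pvMstep M p t := by
  induction t generalizing M p with
  | nil => simp [pvMstep]
  | cons c t' ih => exact le_trans (le_max_left _ _) (ih _ _)

lemma pv_count_le_Mstep (M : Int) (p t : List Char)
    (h : ∀ c, (p.count c : Int) ≤ M) :
    ∀ c, ((p ++ t).count c : Int) ≤ pvMstep M p t := by
  induction t generalizing M p with
  | nil => simpa [pvMstep] using h
  | cons c t' ih =>
    intro x
    have h' : ∀ y, (((p ++ [c]).count y : Int)) ≤ max M ((p.count c : Int) + 1) := by
      intro y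
      have hy := h y
      have h1 := le_max_left M ((p.count c : Int) + 1)
      have h2 := le_max_right M ((p.count c : Int) + 1)
      rw [pv_count_append]
      by_cases hyc : y = c
      · subst hyc; rw [if_pos rfl]; omega
      · rw [if_neg hyc]; omega
    have := ih (max M ((p.count c : Int) + 1)) (p ++ [c]) h' x
    rw [pvMstep]
    simpa [List.append_assoc] using this

lemma pv_Mstep_le (M B : Int) (p t : List Char)
    (hB : ∀ c, ((p ++ t).count c : Int) ≤ B) (hMB : M ≤ B) :
    pvMstep M p t ≤ B := by
  induction t generalizing M p with
  | nil => simpa [pvMstep] using hMB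
  | cons c t' ih =>
    have hc : (p.count c : Int) + 1 ≤ B := by
      have := hB c
      rw [List.count_append] at this
      push_cast at this
      have hc1 : (1 : Int) ≤ ((c :: t').count c : Int) := by
        have : 0 < (c :: t').count c := List.count_pos_iff.mpr List.mem_cons_self
        exact_mod_cast this
      omega
    have hB' : ∀ x, (((p ++ [c]) ++ t').count x : Int) ≤ B := by
      intro x; have := hB x; simpa [List.append_assoc] using this
    have := ih (max M ((p.count c : Int) + 1)) (p ++ [c]) hB'
      (by have h1 := le_max_left M ((p.count c : Int) + 1); omega)
    rw [pvMstep]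
    simpa using this

-- the key correspondence: A's reset-then-append accumulator equals B's single-threshold filter
lemma pv_res_eq_go (t : List Char) : ∀ (M : Int) (r : List String) (p : List Char),
    (∀ c, (p.count c : Int) ≤ M) →
    pvRes M r p t = (if pvMstep M p t = M then r else []) ++ pvGo (pvMstep M p t) p t := by
  induction t with
  | nil => intro M r p _; simp [pvRes, pvMstep, pvGo]
  | cons c t' ih =>
    intro M r p h
    by_cases hgt : ((p.count c : Int) + 1) > M
    · -- reset: the running count of c is a new maximum
      have hmax : max M ((p.count c : Int) + 1) = (p.count c : Int) + 1 := by omega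
      have h' : ∀ y, (((p ++ [c]).count y : Int)) ≤ (p.count c : Int) + 1 := by
        intro y
        have hy := h y
        rw [pv_count_append]
        by_cases hyc : y = c
        · subst hyc; rw [if_pos rfl]
        · rw [if_neg hyc]; omega
      have hK := pv_le_Mstep ((p.count c : Int) + 1) (p ++ [c]) t'
      rw [pvRes, if_pos hgt, ih _ _ _ h', pvGo, pvMstep, hmax]
      rw [if_neg (show ¬ pvMstep ((p.count c : Int) + 1) (p ++ [c]) t' = M by omega)]
      by_cases he : pvMstep ((p.count c : Int) + 1) (p ++ [c]) t' = (p.count c : Int) + 1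
      · rw [if_pos he, if_pos he.symm]; simp
      · rw [if_neg he, if_neg (fun hh => he hh.symm)]
    · have hle : (p.count c : Int) + 1 ≤ M := by omega
      have hmax : max M ((p.count c : Int) + 1) = M := by omega
      have h' : ∀ y, (((p ++ [c]).count y : Int)) ≤ M := by
        intro y
        have hy := h y
        rw [pv_count_append]
        by_cases hyc : y = c
        · subst hyc; rw [if_pos rfl]; omega
        · rw [if_neg hyc]; omega
      have hK := pv_le_Mstep M (p ++ [c]) t'
      by_cases heq : ((p.count c : Int) + 1) = M
      · rw [pvRes, if_neg hgt, if_pos heq, ih _ _ _ h', pvGo, pvMstep, hmax]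
        by_cases he : pvMstep M (p ++ [c]) t' = M
        · rw [if_pos he, if_pos he, if_pos (by omega)]; simp [List.append_assoc]
        · rw [if_neg he, if_neg he, if_neg (by omega : ¬ ((p.count c : Int) + 1) = pvMstep M (p ++ [c]) t')]
      · rw [pvRes, if_neg hgt, if_neg heq, ih _ _ _ h', pvGo, pvMstep, hmax]
        rw [if_neg (by omega : ¬ ((p.count c : Int) + 1) = pvMstep M (p ++ [c]) t')]

-- A's loop, characterised
lemma pv_A_fold (t : List Char) : ∀ (p : List Char) (M : Int) (r : List String),
    (t.foldl
      (fun (st : PySem.Dict Char Int × Int × List String) (c : Char) =>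
        let freq := if st.1.contains c then st.1.insert c (st.1.getD c 0 + 1)
                    else st.1.insert c 1
        let fc := freq.getD c 0
        if fc > st.2.1 then (freq, fc, [c.toString])
        else if fc = st.2.1 then (freq, st.2.1, st.2.2 ++ [c.toString])
        else (freq, st.2.1, st.2.2))
      (PySem.Dict.counter p, M, r))
    = (PySem.Dict.counter (p ++ t), pvMstep M p t, pvRes M r p t) := by
  induction t with
  | nil => intro p M r; simp [pvMstep, pvRes]
  | cons c t' ih =>
    intro p M r
    have hfreq : (if (PySem.Dict.counter p).contains c
          then (PySem.Dict.counter p).insert c ((PySem.Dict.counter p).getD c 0 + 1)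
          else (PySem.Dict.counter p).insert c 1)
        = PySem.Dict.counter (p ++ [c]) := by
      rw [pv_counter_append]
      by_cases hc : (PySem.Dict.counter p).contains c
      · rw [if_pos hc]
      · have hmem : c ∉ p := by
          rw [PySem.Dict.contains_counter] at hc
          simpa using hc
        have h0 : (PySem.Dict.counter p).getD c 0 = 0 := by
          rw [PySem.Dict.getD_counter]
          simp [List.count_eq_zero.mpr hmem]
        rw [if_neg hc, h0]; norm_num
    have hfc : (PySem.Dict.counter (p ++ [c])).getD c 0 = (p.count c : Int) + 1 := by
      rw [pv_counter_append, PySem.Dict.getD_insert_self, PySem.Dict.getD_counter]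
    simp only [List.foldl_cons]
    simp only [hfreq, hfc]
    rw [pvMstep, pvRes]
    by_cases hgt : ((p.count c : Int) + 1) > M
    · rw [if_pos hgt, if_pos hgt, ih (p ++ [c])]
      have hmax : max M ((p.count c : Int) + 1) = (p.count c : Int) + 1 := by omega
      rw [hmax]; simp [List.append_assoc]
    · have hmax : max M ((p.count c : Int) + 1) = M := by omega
      by_cases heq : ((p.count c : Int) + 1) = M
      · rw [if_neg hgt, if_neg hgt, if_pos heq, if_pos heq, ih (p ++ [c]), hmax]
        simp [List.append_assoc]
      · rw [if_neg hgt, if_neg hgt, if_neg heq, if_neg heq, ih (p ++ [c]), hmax]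
        simp [List.append_assoc]

-- B's second pass, characterised
lemma pv_B_fold (m : Int) (t : List Char) : ∀ (p : List Char) (r : List String),
    (t.foldl
      (fun (st : PySem.Dict Char Int × List String) (c : Char) =>
        let running := st.1.insert c (st.1.getD c 0 + 1)
        if running.getD c 0 = m then (running, st.2 ++ [c.toString])
        else (running, st.2))
      (PySem.Dict.counter p, r))
    = (PySem.Dict.counter (p ++ t), r ++ pvGo m p t) := by
  induction t with
  | nil => intro p r; simp [pvGo]
  | cons c t' ih =>
    intro p r
    have hrun : (PySem.Dict.counter p).insert c ((PySem.Dict.counter p).getD c 0 + 1)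
        = PySem.Dict.counter (p ++ [c]) := (pv_counter_append p c).symm
    have hfc : (PySem.Dict.counter (p ++ [c])).getD c 0 = (p.count c : Int) + 1 := by
      rw [pv_counter_append, PySem.Dict.getD_insert_self, PySem.Dict.getD_counter]
    simp only [List.foldl_cons]
    simp only [hrun, hfc]
    rw [pvGo]
    by_cases heq : ((p.count c : Int) + 1) = m
    · rw [if_pos heq, if_pos heq, ih (p ++ [c])]
      simp [List.append_assoc]
    · rw [if_neg heq, if_neg heq, ih (p ++ [c])]
      simp [List.append_assoc]

-- B's first pass: max of the counter's values is the overall maximum running count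
lemma pv_max_eq (cs : List Char) (hne : cs ≠ []) :
    (PySem.List.max? (PySem.Dict.counter cs).values (fun x => x)).getD 0 = pvMstep 0 [] cs := by
  have hnodup := PySem.Dict.nodup_keys_counter (κ := Char) cs
  have hvals : (PySem.Dict.counter cs).values
      = (PySem.Dict.counter cs).keys.map (fun k => (PySem.Dict.counter cs).getD k 0) :=
    PySem.Dict.values_eq_map_keys _ hnodup 0
  have hkeys : (PySem.Dict.counter cs).keys = PySem.Set.ofList cs := PySem.Dict.keys_counter cs
  obtain ⟨c0, cs', rfl⟩ : ∃ c0 cs', cs = c0 :: cs' := by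
    cases cs with
    | nil => exact absurd rfl hne
    | cons a b => exact ⟨a, b, rfl⟩
  set cs := c0 :: cs'
  have hkeysne : (PySem.Dict.counter cs).keys ≠ [] := by
    intro hnil
    have : c0 ∈ (PySem.Dict.counter cs).keys := by
      rw [hkeys, PySem.Set.mem_ofList]; exact List.mem_cons_self
    rw [hnil] at this; exact absurd this (List.not_mem_nil)
  have hvalsne : (PySem.Dict.counter cs).values ≠ [] := by
    rw [hvals]; simpa using hkeysne
  obtain ⟨m, hm⟩ : ∃ m, PySem.List.max? (PySem.Dict.counter cs).values (fun x => x) = some m := by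
    cases hmx : PySem.List.max? (PySem.Dict.counter cs).values (fun x => x) with
    | none => exact absurd ((PySem.List.max?_eq_none_iff _ _).mp hmx) hvalsne
    | some m => exact ⟨m, rfl⟩
  rw [hm, Option.getD_some]
  -- m is a total count of some member of cs
  have hmmem := PySem.List.max?_mem hm
  rw [hvals] at hmmem
  obtain ⟨k, hk, hkm⟩ := List.mem_map.mp hmmem
  rw [PySem.Dict.getD_counter] at hkm
  have hkcs : k ∈ cs := by rwa [hkeys, PySem.Set.mem_ofList] at hk
  -- every total count is ≤ m
  have hub : ∀ c, ((cs.count c : Int)) ≤ m := by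
    intro c
    by_cases hc : c ∈ cs
    · have hcv : ((cs.count c : Int)) ∈ (PySem.Dict.counter cs).values := by
        rw [hvals]
        exact List.mem_map.mpr ⟨c, by rwa [hkeys, PySem.Set.mem_ofList], PySem.Dict.getD_counter cs c⟩
      exact PySem.List.max?_isMax hm _ hcv
    · have h0 : cs.count c = 0 := List.count_eq_zero.mpr hc
      have hpos : 0 < cs.count k := List.count_pos_iff.mpr hkcs
      rw [h0]
      have : (0 : Int) < (cs.count k : Int) := by exact_mod_cast hpos
      omega
  have h1 : m ≤ pvMstep 0 [] cs := by
    rw [← hkm]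
    have := pv_count_le_Mstep 0 [] cs (by intro c; simp) k
    simpa using this
  have h2 : pvMstep 0 [] cs ≤ m := by
    apply pv_Mstep_le
    · intro c; simpa using hub c
    · have hpos : 0 < cs.count k := List.count_pos_iff.mpr hkcs
      have := hub k
      have : (0 : Int) < (cs.count k : Int) := by exact_mod_cast hpos
      omega
  omega

lemma pv_counter_nil : (PySem.Dict.counter ([] : List Char)) = PySem.Dict.empty := rfl

-- ===== VERDICT (by name: the statement is the Claim_ definition above) =====
theorem most_frequent_chars2_spec : Claim_equal_most_frequent_chars2 := by
  unfold Claim_equal_most_frequent_chars2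
  intro s _
  unfold Spec_most_frequent_chars2
  by_cases h : s.toList = []
  · simp [most_frequent_chars2, most_frequent_chars2_alt, h]
  · have hA : most_frequent_chars2 s = pvRes 0 [] [] s.toList := by
      unfold most_frequent_chars2
      rw [← pv_counter_nil, pv_A_fold s.toList [] 0 []]
    have hcnt : s.toList.foldl (fun (d : PySem.Dict Char Int) c => d.insert c (d.getD c 0 + 1))
        PySem.Dict.empty = PySem.Dict.counter s.toList :=
      PySem.Dict.foldl_insert_getD_add_one_eq_counter _
    have hB : most_frequent_chars2_alt s = pvGo (pvMstep 0 [] s.toList) [] s.toList := by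
      unfold most_frequent_chars2_alt
      rw [if_neg h]
      simp only [hcnt, pv_max_eq s.toList h]
      rw [show (PySem.Dict.empty : PySem.Dict Char Int) = PySem.Dict.counter [] from rfl]
      rw [pv_B_fold (pvMstep 0 [] s.toList) s.toList [] []]
      simp
    rw [hA, hB, pv_res_eq_go s.toList 0 [] [] (by intro c; simp)]
    have hif : (if pvMstep 0 [] s.toList = 0 then ([] : List String) else []) = [] := by
      split <;> rfl
    rw [hif]
    rfl
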